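-- pv_equiv track=rewrite | github.com/lynn840429/Python_Learning-FuckingAlgorithm | code_imp/window_slide.py | find_min_string
-- ===== SOURCE A (Python) =====
-- def find_min_string(s="", t=""):
--     res = s
--     t_sorted = ''.join(sorted(t))
--
--     for i in range(len(s)+1):
--         for j in range(i+1, len(s)+1, 1):
--             s_sorted = ''.join(sorted(set(s[i:j])))
--             if (s_sorted.find(t_sorted)!=-1) and(len(s_sorted)<len(res)):
--                     res = s_sorted
--
--     return res
-- ===== SOURCE B (Python) =====
-- def find_min_string(s="", t=""):
--     res = s
--     t_sorted = ''.join(sorted(t))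
--     n = len(s)
--     for i in range(n + 1):
--         cur = []  # sorted distinct chars of s[i:k+1], maintained incrementally
--         for k in range(i, n):
--             c = s[k]
--             if c not in cur:
--                 p = 0
--                 while p < len(cur) and cur[p] < c:
--                     p += 1
--                 cur.insert(p, c)
--             cand = ''.join(cur)
--             if t_sorted in cand and len(cand) < len(res):
--                 res = cand
--     return res
-- ===== Notes on version B (the rewrite author's own statement) =====
-- stated objective: faster
-- what changed: Instead of building and sorting set(s[i:j]) from scratch for every substring, B keeps one sorted distinct-character list per start index i and extends it with an ordered insert as the end index grows, testing each candidate incrementally.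
import Mathlib
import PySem

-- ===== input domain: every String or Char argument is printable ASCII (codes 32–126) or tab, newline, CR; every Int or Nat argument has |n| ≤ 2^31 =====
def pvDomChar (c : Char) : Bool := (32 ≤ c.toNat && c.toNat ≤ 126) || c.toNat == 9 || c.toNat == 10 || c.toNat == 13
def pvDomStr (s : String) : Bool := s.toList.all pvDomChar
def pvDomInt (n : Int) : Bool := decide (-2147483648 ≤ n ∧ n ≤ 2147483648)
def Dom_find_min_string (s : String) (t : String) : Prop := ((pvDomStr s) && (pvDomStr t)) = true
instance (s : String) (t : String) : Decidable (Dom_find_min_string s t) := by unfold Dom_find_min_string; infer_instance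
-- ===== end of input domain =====

-- B maintains the sorted distinct-char list of s[i:j] incrementally per start index
-- instead of re-sorting set(s[i:j]) for every substring (objective: faster).


-- ===== PORT A =====
-- A's inner loop over j: candidate = ''.join(sorted(set(s[i:j]))), kept if it contains t_sorted and is shorter
def pvInnerA (sl tS : List Char) (i : Int) (res : List Char) : List Char :=
  (PySem.List.pyRange (i + 1) ((sl.length : Int) + 1) 1).foldl (fun res j =>
    let sSorted := PySem.List.sorted (PySem.Set.ofList (PySem.List.slice sl (some i) (some j))) (fun c => c) false
    if PySem.Chars.find sSorted tS ≠ -1 ∧ sSorted.length < res.length then sSorted else res) res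

def find_min_string (s : String) (t : String) : String :=
  let sl := s.toList
  let tSorted := PySem.List.sorted t.toList (fun c => c) false
  String.mk ((PySem.List.pyRange 0 ((sl.length : Int) + 1) 1).foldl
    (fun res i => pvInnerA sl tSorted i res) sl)

-- ===== PORT B =====
-- the while-loop + list.insert of Source B: insert c before the first element not below it
def pvInsOrd (c : Char) : List Char → List Char
  | [] => [c]
  | x :: xs => if x < c then x :: pvInsOrd c xs else c :: x :: xs

-- B's inner loop over k: extend the sorted distinct-char list `cur` with s[k], then test it
def pvInnerB (sl tS : List Char) (i : Int) (res : List Char) : List Char :=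
  ((PySem.List.pyRange i (sl.length : Int) 1).foldl (fun (p : List Char × List Char) k =>
    let c := PySem.List.pyGetD sl k ' '
    let cur := if c ∈ p.1 then p.1 else pvInsOrd c p.1
    (cur, if PySem.Chars.isIn tS cur = true ∧ cur.length < p.2.length then cur else p.2))
    ([], res)).2

def find_min_string_alt (s : String) (t : String) : String :=
  let sl := s.toList
  let tSorted := PySem.List.sorted t.toList (fun c => c) false
  String.mk ((PySem.List.pyRange 0 ((sl.length : Int) + 1) 1).foldl
    (fun res i => pvInnerB sl tSorted i res) sl)

-- ===== PRECONDITION & SPEC =====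
def Spec_find_min_string (s : String) (t : String) (out : String) : Prop := out = find_min_string_alt s t
instance (s : String) (t : String) (out : String) : Decidable (Spec_find_min_string s t out) := by unfold Spec_find_min_string; infer_instance

-- ===== CLAIM (what is proved, stated in full; the proofs are below) =====
def Claim_equal_find_min_string : Prop := ∀ (s : String) (t : String), Dom_find_min_string s t → Spec_find_min_string s t (find_min_string s t)

-- ===== LEMMAS AND PROOFS =====

-- sorted distinct chars of xs (what A computes per substring)
def pvCanon (xs : List Char) : List Char :=
  PySem.List.sorted (PySem.Set.ofList xs) (fun c => c) false

-- the shared result update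
def pvUpd (tS res cand : List Char) : List Char :=
  if PySem.Chars.isIn tS cand = true ∧ cand.length < res.length then cand else res

-- common normal form of both inner loops
def pvGold (sl tS : List Char) (m : Nat) (res : List Char) : List Char :=
  (List.range (sl.length - m)).foldl
    (fun res k => pvUpd tS res (pvCanon (((sl.drop m)).take (k + 1)))) res

lemma pvInsOrd_perm (c : Char) (l : List Char) : (pvInsOrd c l).Perm (c :: l) := by
  induction l with
  | nil => simp [pvInsOrd]
  | cons x xs ih =>
    simp only [pvInsOrd]
    split
    · exact ((ih.cons x).trans (List.Perm.swap c x xs))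
    · exact List.Perm.refl _

lemma pvInsOrd_mem (c : Char) (l : List Char) (y : Char) :
    y ∈ pvInsOrd c l ↔ y = c ∨ y ∈ l := by
  have := (pvInsOrd_perm c l).mem_iff (a := y)
  simpa using this

lemma pvInsOrd_pairwise (c : Char) (l : List Char)
    (h : l.Pairwise (· < ·)) (hc : c ∉ l) : (pvInsOrd c l).Pairwise (· < ·) := by
  induction l with
  | nil => simp [pvInsOrd]
  | cons x xs ih =>
    rcases List.pairwise_cons.mp h with ⟨hx, hxs⟩
    simp only [pvInsOrd]
    split
    · rename_i hlt
      refine List.pairwise_cons.mpr ⟨?_, ih hxs (fun m => hc (List.mem_cons_of_mem _ m))⟩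
      intro y hy
      rcases (pvInsOrd_mem c xs y).mp hy with rfl | hy'
      · exact hlt
      · exact hx y hy'
    · rename_i hnlt
      have hcx : c < x := lt_of_le_of_ne (not_lt.mp hnlt) (fun e => hc (e ▸ List.mem_cons_self))
      refine List.pairwise_cons.mpr ⟨?_, h⟩
      intro y hy
      rcases List.mem_cons.mp hy with rfl | hy'
      · exact hcx
      · exact hcx.trans (hx y hy')

lemma pvCanon_pairwise (xs : List Char) : (pvCanon xs).Pairwise (· < ·) := by
  simpa [pvCanon] using PySem.List.sorted_ofList_pairwise_lt (xs := xs)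

lemma pvCanon_perm (xs : List Char) : (pvCanon xs).Perm (PySem.Set.ofList xs) :=
  PySem.List.sorted_perm _ _ _

lemma pvCanon_mem (xs : List Char) (y : Char) : y ∈ pvCanon xs ↔ y ∈ xs := by
  rw [(pvCanon_perm xs).mem_iff, PySem.Set.mem_ofList]

lemma pvCanon_step (xs : List Char) (c : Char) :
    (if c ∈ pvCanon xs then pvCanon xs else pvInsOrd c (pvCanon xs)) = pvCanon (xs ++ [c]) := by
  by_cases hc : c ∈ pvCanon xs
  · rw [if_pos hc]
    have hmem : c ∈ PySem.Set.ofList xs := (PySem.Set.mem_ofList xs c).mpr ((pvCanon_mem xs c).mp hc)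
    unfold pvCanon
    rw [PySem.Set.ofList_append_singleton, PySem.Set.add_of_mem hmem]
  · rw [if_neg hc]
    have hnm : c ∉ PySem.Set.ofList xs := fun mm =>
      hc ((pvCanon_mem xs c).mpr ((PySem.Set.mem_ofList xs c).mp mm))
    have hperm : (pvInsOrd c (pvCanon xs)).Perm (PySem.Set.ofList xs ++ [c]) :=
      (pvInsOrd_perm c (pvCanon xs)).trans
        (((pvCanon_perm xs).cons c).trans (List.perm_append_singleton c _).symm)
    have hpw : (pvInsOrd c (pvCanon xs)).Pairwise (· < ·) :=
      pvInsOrd_pairwise c _ (pvCanon_pairwise xs) hc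
    unfold pvCanon
    rw [PySem.Set.ofList_append_singleton, PySem.Set.add_of_not_mem hnm]
    exact (PySem.List.sorted_eq_of_perm_of_pairwise_lt _ _ _ hperm hpw).symm

lemma pv_find_isIn (tS cand : List Char) :
    (PySem.Chars.find cand tS ≠ -1) ↔ (PySem.Chars.isIn tS cand = true) := by
  rw [PySem.Chars.find_ne_neg_one_iff, PySem.Chars.isIn_iff_infix]

lemma pvInnerA_eq (sl tS : List Char) (m : Nat) (res : List Char) (hm : m ≤ sl.length) :
    pvInnerA sl tS (m : Int) res = pvGold sl tS m res := by
  unfold pvInnerA pvGold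
  rw [PySem.List.pyRange_one,
    show (((sl.length : Int) + 1) - ((m : Int) + 1)).toNat = sl.length - m by omega,
    List.foldl_map]
  apply PySem.List.foldl_congr_mem
  intro r k hk
  have hslice : PySem.List.slice sl (some (m : Int)) (some ((m : Int) + 1 + (k : Int)))
      = (sl.drop m).take (k + 1) := by
    rw [show (m : Int) + 1 + (k : Int) = (m : Int) + ((k + 1 : Nat) : Int) by push_cast; ring,
      PySem.List.slice_natCast_add]
  simp only [hslice, pvUpd, pvCanon, pv_find_isIn]

-- B's inner loop computes canon of the growing prefix and feeds it to the same update
lemma pvInnerB_core (sl tS : List Char) (m : Nat) :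
    ∀ (M : Nat), m + M ≤ sl.length → ∀ (res : List Char),
    (List.range M).foldl (fun (p : List Char × List Char) (k : Nat) =>
        let c := PySem.List.pyGetD sl ((m : Int) + (k : Int)) ' '
        let cur := if c ∈ p.1 then p.1 else pvInsOrd c p.1
        (cur, if PySem.Chars.isIn tS cur = true ∧ cur.length < p.2.length then cur else p.2))
      ([], res)
      = (pvCanon ((sl.drop m).take M),
         (List.range M).foldl (fun res k => pvUpd tS res (pvCanon ((sl.drop m).take (k + 1)))) res) := by
  intro M
  induction M with
  | zero =>
    intro _ res
    simp only [List.range_zero, List.foldl_nil, List.take_zero]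
    have : pvCanon ([] : List Char) = [] := by decide
    rw [this]
  | succ M ih =>
    intro hM res
    have hm' : M < (sl.drop m).length := by simp; omega
    rw [List.range_succ, List.foldl_append, List.foldl_append, ih (by omega) res]
    simp only [List.foldl_cons, List.foldl_nil]
    have hget : PySem.List.pyGetD sl ((m : Int) + (M : Int)) ' ' = (sl.drop m).getD M ' ' := by
      rw [show (m : Int) + (M : Int) = ((m + M : Nat) : Int) by push_cast; ring,
        PySem.List.pyGetD_natCast]
      simp [List.getD, List.getElem?_drop]
    have htake : (sl.drop m).take (M + 1) = (sl.drop m).take M ++ [(sl.drop m)[M]] := by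
      rw [List.take_succ, List.getElem?_eq_getElem hm']; rfl
    have hstep : (if PySem.List.pyGetD sl ((m : Int) + (M : Int)) ' ' ∈ pvCanon ((sl.drop m).take M)
        then pvCanon ((sl.drop m).take M)
        else pvInsOrd (PySem.List.pyGetD sl ((m : Int) + (M : Int)) ' ') (pvCanon ((sl.drop m).take M)))
        = pvCanon ((sl.drop m).take (M + 1)) := by
      rw [hget, List.getD_eq_getElem (sl.drop m) ' ' hm', pvCanon_step ((sl.drop m).take M) _, ← htake]
    simp only [hstep, pvUpd]

lemma pvInnerB_eq (sl tS : List Char) (m : Nat) (res : List Char) (hm : m ≤ sl.length) :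
    pvInnerB sl tS (m : Int) res = pvGold sl tS m res := by
  unfold pvInnerB pvGold
  rw [PySem.List.pyRange_one,
    show ((sl.length : Int) - (m : Int)).toNat = sl.length - m by omega,
    List.foldl_map]
  exact congrArg Prod.snd (pvInnerB_core sl tS m (sl.length - m) (by omega) res)

-- ===== VERDICT (by name: the statement is the Claim_ definition above) =====
theorem find_min_string_spec : Claim_equal_find_min_string := by
  intro s t _
  unfold Spec_find_min_string
  simp only [find_min_string, find_min_string_alt]
  refine congrArg String.mk ?_
  apply PySem.List.foldl_congr_mem
  intro res i hi
  obtain ⟨hi0, hiub⟩ := PySem.List.mem_pyRange_one.mp hi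
  obtain ⟨m, rfl⟩ : ∃ m : Nat, i = (m : Int) := ⟨i.toNat, (Int.toNat_of_nonneg hi0).symm⟩
  have hm : m ≤ s.toList.length := by omega
  rw [pvInnerA_eq _ _ _ _ hm, pvInnerB_eq _ _ _ _ hm]
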